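-- pv_equiv track=rewrite | github.com/OMOTE-Community/OMOTE-Firmware | flipper-to-omote.py | parse_ir
-- ===== SOURCE A (Python) =====
-- from typing import Dict, List, Tuple
--
-- def parse_ir(text: str) -> List[dict]:
--     records, cur = [], {}
--     def flush():
--         if cur:
--             records.append(cur.copy()); cur.clear()
--     for line in text.splitlines():
--         line = line.strip()
--         if not line or line.startswith("#"):
--             flush(); continue
--         if ":" not in line:
--             continue
--         k, v = [p.strip() for p in line.split(":", 1)]
--         if k.lower() == "name":
--             flush(); cur["Function"] = v
--         else:
--             cur[k.title()] = v
--     flush()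
--     return [r for r in records if r.get("Type", "parsed").lower() != "raw"]
-- ===== SOURCE B (Python) =====
-- def parse_ir(text):
--     # stage 1: classify every line into a BREAK / NAME / PAIR token; drop unparseable lines
--     def token(raw):
--         line = raw.strip()
--         if not line or line.startswith("#"):
--             return ("BREAK",)
--         if ":" not in line:
--             return None
--         k, v = line.split(":", 1)
--         k, v = k.strip(), v.strip()
--         if k.lower() == "name":
--             return ("NAME", v)
--         return ("PAIR", k.title(), v)
--
--     toks = [t for t in map(token, text.splitlines()) if t is not None]
--
--     # stage 2: slice one record's run of pair tokens off the stream starting at i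
--     def grab(i):
--         t = toks[i]
--         pairs = [("Function", t[1])] if t[0] == "NAME" else [(t[1], t[2])]
--         i += 1
--         while i < len(toks) and toks[i][0] == "PAIR":
--             pairs.append((toks[i][1], toks[i][2]))
--             i += 1
--         if i < len(toks) and toks[i][0] == "BREAK":
--             i += 1
--         return pairs, i
--
--     # stage 3: walk the stream record by record, dictify and filter
--     out, i = [], 0
--     while i < len(toks):
--         if toks[i][0] == "BREAK":
--             i += 1
--             continue
--         pairs, i = grab(i)
--         rec = dict(pairs)
--         if rec.get("Type", "parsed").lower() != "raw":
--             out.append(rec)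
--     return out
-- ===== Notes on version B (the rewrite author's own statement) =====
-- stated objective: alternative
-- what changed: Replaces A's single stateful pass (a flush closure mutating one current dict) by a tokenize-then-slice pipeline: each line is first mapped to a BREAK/NAME/PAIR token (unparseable lines dropped), then records are obtained by repeatedly slicing one record's run of tokens off the front of the stream, dictifying and filtering it.
import Mathlib
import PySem

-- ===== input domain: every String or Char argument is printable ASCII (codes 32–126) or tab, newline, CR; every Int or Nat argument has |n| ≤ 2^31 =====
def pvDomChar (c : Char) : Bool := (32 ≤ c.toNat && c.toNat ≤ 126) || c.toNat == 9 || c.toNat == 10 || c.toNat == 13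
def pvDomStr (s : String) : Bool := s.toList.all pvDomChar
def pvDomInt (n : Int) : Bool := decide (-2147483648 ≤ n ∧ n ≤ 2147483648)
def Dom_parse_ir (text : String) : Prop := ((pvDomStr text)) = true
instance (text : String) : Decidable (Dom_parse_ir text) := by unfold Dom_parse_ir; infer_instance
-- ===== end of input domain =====

-- B replaces A's single stateful pass (flush closure mutating one current dict) by a
-- tokenize-then-slice pipeline: map each line to a BREAK/NAME/PAIR token, then repeatedly
-- slice one record's run of tokens off the stream; objective: alternative decomposition.

-- shared helper: Python str.title(), exact on ASCII (a char is cased iff isalpha)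
def pvTitleChars : List Char → Bool → List Char
  | [], _ => []
  | c :: rest, prevAlpha =>
    (if PySem.Chars.isalpha c then
       (if prevAlpha then PySem.Chars.lowerChar c else PySem.Chars.upperChar c)
     else c) :: pvTitleChars rest (PySem.Chars.isalpha c)

def pvTitle (s : String) : String := String.ofList (pvTitleChars s.toList false)

-- ===== PORT A =====
-- loop body of A: state = (records, cur); flush = append cur if non-empty, clear cur
def pvAStep (st : List (PySem.Dict String String) × PySem.Dict String String) (line0 : String) :
    List (PySem.Dict String String) × PySem.Dict String String :=
  let records := st.1
  let cur := st.2
  let line := PySem.Str.strip line0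
  if line = "" || PySem.Str.startswith line "#" then
    ((if cur.items = [] then records else records ++ [cur]), PySem.Dict.empty)
  else if !(PySem.Str.isIn ":" line) then st
  else
    match (PySem.Str.splitMax? line ":" 1).getD [] with
    | k0 :: v0 :: _ =>
      let k := PySem.Str.strip k0
      let v := PySem.Str.strip v0
      if PySem.Str.lower k = "name" then
        ((if cur.items = [] then records else records ++ [cur]),
         PySem.Dict.empty.insert "Function" v)
      else (records, cur.insert (pvTitle k) v)
    | _ => st

def parse_ir (text : String) : List (List (String × String)) :=
  let fin := (PySem.Str.splitlines text).foldl pvAStep ([], PySem.Dict.empty)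
  let records := if fin.2.items = [] then fin.1 else fin.1 ++ [fin.2]
  (records.filter (fun r => PySem.Str.lower (r.getD "Type" "parsed") != "raw")).map
    (fun r => r.items)

-- ===== PORT B =====
inductive PvTok : Type
  | brk : PvTok
  | name : String → PvTok
  | pair : String → String → PvTok
deriving DecidableEq, Repr

-- stage 1 of B: classify a line; none = unparseable line, dropped
def pvToken (raw : String) : Option PvTok :=
  let line := PySem.Str.strip raw
  if line = "" || PySem.Str.startswith line "#" then some PvTok.brk
  else if !(PySem.Str.isIn ":" line) then none
  else
    match (PySem.Str.splitMax? line ":" 1).getD [] with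
    | k0 :: v0 :: _ =>
      let k := PySem.Str.strip k0
      let v := PySem.Str.strip v0
      if PySem.Str.lower k = "name" then some (PvTok.name v)
      else some (PvTok.pair (pvTitle k) v)
    | _ => none

-- stage 2 of B: the run of PAIR tokens at the front of the stream
def pvTakePairs : List PvTok → List (String × String) × List PvTok
  | PvTok.pair k v :: rest =>
    let r := pvTakePairs rest
    ((k, v) :: r.1, r.2)
  | ts => ([], ts)

def pvDropBreak : List PvTok → List PvTok
  | PvTok.brk :: r => r
  | ts => ts

-- grab: one record's pairs sliced off the stream (t = first token, r = the rest)
def pvGrab (t : PvTok) (r : List PvTok) : List (String × String) × List PvTok :=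
  let head := match t with
    | PvTok.name v => [("Function", v)]
    | PvTok.pair k v => [(k, v)]
    | PvTok.brk => []   -- unreachable: the walk below never grabs at a BREAK
  let tp := pvTakePairs r
  (head ++ tp.1, pvDropBreak tp.2)

theorem pvTakePairs_len : ∀ ts : List PvTok, (pvTakePairs ts).2.length ≤ ts.length := by
  intro ts
  induction ts with
  | nil => simp [pvTakePairs]
  | cons t r ih =>
    cases t <;> simp [pvTakePairs] <;> omega

theorem pvDropBreak_len : ∀ ts : List PvTok, (pvDropBreak ts).length ≤ ts.length := by
  intro ts
  cases ts with
  | nil => simp [pvDropBreak]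
  | cons t r => cases t <;> simp [pvDropBreak]

theorem pvGrab_len (t : PvTok) (r : List PvTok) :
    (pvGrab t r).2.length ≤ r.length := by
  unfold pvGrab
  exact le_trans (pvDropBreak_len _) (pvTakePairs_len r)

def pvToDict (g : List (String × String)) : PySem.Dict String String :=
  g.foldl (fun d kv => d.insert kv.1 kv.2) PySem.Dict.empty

-- stage 3 of B: walk the token stream record by record, dictify and filter
def pvBLoop : List PvTok → List (List (String × String))
  | [] => []
  | PvTok.brk :: r => pvBLoop r
  | t :: r =>
    let g := pvGrab t r
    let rec0 := pvToDict g.1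
    (if PySem.Str.lower (rec0.getD "Type" "parsed") != "raw" then [rec0.items] else []) ++
      pvBLoop g.2
termination_by ts => ts.length
decreasing_by
  · simp
  · have := pvGrab_len t r; simp; omega

def parse_ir_alt (text : String) : List (List (String × String)) :=
  pvBLoop ((PySem.Str.splitlines text).filterMap pvToken)

-- ===== PRECONDITION & SPEC =====
def Spec_parse_ir (text : String) (out : List (List (String × String))) : Prop := out = parse_ir_alt text
instance (text : String) (out : List (List (String × String))) : Decidable (Spec_parse_ir text out) := by unfold Spec_parse_ir; infer_instance

-- ===== CLAIM (what is proved, stated in full; the proofs are below) =====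
def Claim_equal_parse_ir : Prop := ∀ (text : String), Dom_parse_ir text → Spec_parse_ir text (parse_ir text)

-- ===== LEMMAS AND PROOFS =====
-- proof helper: A's pass, rewritten with the current record as a pair list
def pvMidStep (st : List (List (String × String)) × List (String × String)) (line0 : String) :
    List (List (String × String)) × List (String × String) :=
  let groups := st.1
  let cg := st.2
  let line := PySem.Str.strip line0
  if line = "" || PySem.Str.startswith line "#" then
    ((if cg = [] then groups else groups ++ [cg]), [])
  else if !(PySem.Str.isIn ":" line) then st
  else
    match (PySem.Str.splitMax? line ":" 1).getD [] with
    | k0 :: v0 :: _ =>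
      let k := PySem.Str.strip k0
      let v := PySem.Str.strip v0
      if PySem.Str.lower k = "name" then
        ((if cg = [] then groups else groups ++ [cg]), [("Function", v)])
      else (groups, cg ++ [(pvTitle k, v)])
    | _ => st

theorem pvToDict_nil : pvToDict [] = PySem.Dict.empty := rfl

theorem items_insert_ne_nil (d : PySem.Dict String String) (k v : String) :
    (d.insert k v).items ≠ [] := by
  rw [PySem.Dict.items_insert]
  split
  · rename_i hc
    intro hnil
    have hd : d.items = [] := by simpa using hnil
    have hk := (PySem.Dict.contains_iff_mem_keys _ _).mp hc
    simp [PySem.Dict.keys, hd] at hk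
  · simp

theorem pvToDict_items_nil_iff (g : List (String × String)) :
    (pvToDict g).items = [] ↔ g = [] := by
  constructor
  · intro h
    cases g with
    | nil => rfl
    | cons p rest =>
      exfalso
      have aux : ∀ (l : List (String × String)) (d : PySem.Dict String String),
          d.items ≠ [] → (l.foldl (fun d kv => d.insert kv.1 kv.2) d).items ≠ [] := by
        intro l
        induction l with
        | nil => intro d hd; simpa using hd
        | cons q t ih =>
          intro d hd
          exact ih _ (items_insert_ne_nil d q.1 q.2)
      exact aux rest _ (items_insert_ne_nil PySem.Dict.empty p.1 p.2)
        (by simpa [pvToDict] using h)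
  · intro h; subst h; rfl

theorem pvToDict_append_singleton (g : List (String × String)) (p : String × String) :
    pvToDict (g ++ [p]) = (pvToDict g).insert p.1 p.2 := by
  simp [pvToDict, List.foldl_append]

theorem pvStep_rel (gs : List (List (String × String))) (cg : List (String × String))
    (line0 : String) :
    pvAStep (gs.map pvToDict, pvToDict cg) line0 =
      ((pvMidStep (gs, cg) line0).1.map pvToDict, pvToDict (pvMidStep (gs, cg) line0).2) := by
  unfold pvAStep pvMidStep
  simp only []
  split
  · simp [pvToDict_items_nil_iff]
    split <;> simp [pvToDict_nil]
  · split
    · rfl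
    · split
      · rename_i k0 v0 rest _
        split
        · simp [pvToDict_items_nil_iff]
          split <;> simp [pvToDict, PySem.Dict.empty]
        · simp [pvToDict_append_singleton]
      · rfl

theorem pvFoldl_rel (lines : List String) :
    ∀ (gs : List (List (String × String))) (cg : List (String × String)),
      lines.foldl pvAStep (gs.map pvToDict, pvToDict cg) =
        ((lines.foldl pvMidStep (gs, cg)).1.map pvToDict,
         pvToDict (lines.foldl pvMidStep (gs, cg)).2) := by
  induction lines with
  | nil => intro gs cg; rfl
  | cons l t ih =>
    intro gs cg
    have h := pvStep_rel gs cg l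
    simp only [List.foldl_cons, h]
    exact ih (pvMidStep (gs, cg) l).1 (pvMidStep (gs, cg) l).2

-- token-level step: what pvMidStep does, factored through pvToken
def pvTokStep (st : List (List (String × String)) × List (String × String)) (t : PvTok) :
    List (List (String × String)) × List (String × String) :=
  match t with
  | PvTok.brk => ((if st.2 = [] then st.1 else st.1 ++ [st.2]), [])
  | PvTok.name v => ((if st.2 = [] then st.1 else st.1 ++ [st.2]), [("Function", v)])
  | PvTok.pair k v => (st.1, st.2 ++ [(k, v)])

set_option maxHeartbeats 2000000 in
theorem pvMidStep_token (st : List (List (String × String)) × List (String × String))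
    (line0 : String) :
    pvMidStep st line0 = (match pvToken line0 with
      | none => st
      | some t => pvTokStep st t) := by
  unfold pvMidStep pvToken
  by_cases h1 : (decide (PySem.Str.strip line0 = "") || PySem.Str.startswith (PySem.Str.strip line0) "#") = true
  · simp only [h1, reduceIte]
    rfl
  · simp only [h1, Bool.false_eq_true, reduceIte]
    by_cases h2 : (!PySem.Str.isIn ":" (PySem.Str.strip line0)) = true
    · simp only [h2, reduceIte]
    · simp only [h2, Bool.false_eq_true, reduceIte]
      rcases hm : (PySem.Str.splitMax? (PySem.Str.strip line0) ":" 1).getD [] with _ | ⟨k0, _ | ⟨v0, rest⟩⟩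
      · rfl
      · rfl
      · by_cases h3 : PySem.Str.lower (PySem.Str.strip k0) = "name"
        · simp only [h3, reduceIte]
          rfl
        · simp only [h3, reduceIte]
          rfl

theorem pvFoldl_token (lines : List String) :
    ∀ st, lines.foldl pvMidStep st = (lines.filterMap pvToken).foldl pvTokStep st := by
  induction lines with
  | nil => intro st; rfl
  | cons l t ih =>
    intro st
    simp only [List.foldl_cons, List.filterMap_cons, pvMidStep_token st l]
    cases pvToken l with
    | none => exact ih st
    | some t' => simp only [List.foldl_cons]; exact ih _

-- functional description of the token walk: pvCont cg ts = groups still to come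
def pvCont : List (String × String) → List PvTok → List (List (String × String))
  | cg, [] => if cg = [] then [] else [cg]
  | cg, PvTok.brk :: r => (if cg = [] then [] else [cg]) ++ pvCont [] r
  | cg, PvTok.name v :: r => (if cg = [] then [] else [cg]) ++ pvCont [("Function", v)] r
  | cg, PvTok.pair k v :: r => pvCont (cg ++ [(k, v)]) r

theorem pvFold_cont (ts : List PvTok) :
    ∀ gs cg,
      (if (ts.foldl pvTokStep (gs, cg)).2 = [] then (ts.foldl pvTokStep (gs, cg)).1
       else (ts.foldl pvTokStep (gs, cg)).1 ++ [(ts.foldl pvTokStep (gs, cg)).2]) =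
        gs ++ pvCont cg ts := by
  induction ts with
  | nil => intro gs cg; simp [pvCont]; split <;> simp
  | cons t r ih =>
    intro gs cg
    cases t with
    | brk =>
      simp only [List.foldl_cons, pvTokStep, pvCont, ih]
      by_cases hcg : cg = [] <;> simp [hcg]
    | name v =>
      simp only [List.foldl_cons, pvTokStep, pvCont, ih]
      by_cases hcg : cg = [] <;> simp [hcg]
    | pair k v =>
      simp only [List.foldl_cons, pvTokStep, pvCont, ih]

theorem pvCont_grab (r : List PvTok) :
    ∀ cg, cg ≠ [] →
      pvCont cg r = (cg ++ (pvTakePairs r).1) :: pvCont [] (pvDropBreak (pvTakePairs r).2) := by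
  induction r with
  | nil => intro cg h; simp [pvCont, pvTakePairs, pvDropBreak, h]
  | cons t r ih =>
    intro cg h
    cases t with
    | brk => simp [pvCont, pvTakePairs, pvDropBreak, h]
    | name v => simp [pvCont, pvTakePairs, pvDropBreak, h]
    | pair k v =>
      simp only [pvCont, pvTakePairs]
      rw [ih (cg ++ [(k, v)]) (by simp)]
      simp

-- dictify + filter + items, the common final stage
def pvEmit (gs : List (List (String × String))) : List (List (String × String)) :=
  ((gs.map pvToDict).filter
      (fun r => PySem.Str.lower (r.getD "Type" "parsed") != "raw")).map
    (fun r => r.items)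

theorem pvEmit_cons (g : List (String × String)) (gs : List (List (String × String))) :
    pvEmit (g :: gs) =
      (if PySem.Str.lower ((pvToDict g).getD "Type" "parsed") != "raw"
       then [(pvToDict g).items] else []) ++ pvEmit gs := by
  simp only [pvEmit, List.map_cons, List.filter_cons]
  split <;> simp_all

theorem pvBLoop_emit (ts : List PvTok) : pvBLoop ts = pvEmit (pvCont [] ts) := by
  induction ts using pvBLoop.induct with
  | case1 => simp [pvBLoop, pvCont, pvEmit]
  | case2 r ih => simp only [pvBLoop, pvCont]; simpa using ih
  | case3 t r hne hne2 ih =>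
    cases t with
    | brk => exact absurd rfl hne
    | name v =>
      simp only [pvBLoop]
      rw [ih]
      have h := pvCont_grab r [("Function", v)] (by simp)
      have h2 : hne2 = pvGrab (PvTok.name v) r := rfl
      simp only [pvCont, h, reduceIte, List.nil_append]
      rw [pvEmit_cons, h2]
      simp [pvGrab]
    | pair k v =>
      simp only [pvBLoop]
      rw [ih]
      have h := pvCont_grab r [(k, v)] (by simp)
      have h2 : hne2 = pvGrab (PvTok.pair k v) r := rfl
      simp only [pvCont, List.nil_append, h]
      rw [pvEmit_cons, h2]
      simp [pvGrab]

-- ===== VERDICT (by name: the statement is the Claim_ definition above) =====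
theorem parse_ir_spec : Claim_equal_parse_ir := by
  intro text _
  unfold Spec_parse_ir parse_ir parse_ir_alt
  have h := pvFoldl_rel (PySem.Str.splitlines text) [] []
  simp only [List.map_nil, pvToDict_nil] at h
  simp only [h, pvToDict_items_nil_iff]
  rw [pvBLoop_emit]
  have hc := pvFold_cont ((PySem.Str.splitlines text).filterMap pvToken) [] []
  rw [← pvFoldl_token] at hc
  simp only [List.nil_append] at hc
  rw [← hc]
  unfold pvEmit
  split
  · simp [List.filter_map]
  · simp [List.filter_map]
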